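-- pv_equiv track=rewrite | github.com/GoDoWrk/roundup | app/services/content_quality.py | _ordered_reasons
-- ===== SOURCE A (Python) =====
-- def _ordered_reasons(reasons: set[str]) -> tuple[str, ...]:
--     priority = [
--         "stale_content",
--         "affiliate_finance",
--         "service_journalism",
--         "low_trust_aggregator",
--         "insufficient_high_quality_sources",
--     ]
--     return tuple(reason for reason in priority if reason in reasons)
-- ===== SOURCE B (Python) =====
-- def _ordered_reasons(reasons: set[str]) -> tuple[str, ...]:
--     rank = {r: i for i, r in enumerate([
--         "stale_content",
--         "affiliate_finance",
--         "service_journalism",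
--         "low_trust_aggregator",
--         "insufficient_high_quality_sources",
--     ])}
--     kept = [r for r in reasons if r in rank]
--     kept.sort(key=rank.__getitem__)
--     return tuple(kept)
-- ===== Notes on version B (the rewrite author's own statement) =====
-- stated objective: alternative
-- what changed: Instead of scanning the fixed priority list and testing membership in the input set, B builds a rank dict once, iterates over the input set keeping only reasons present in the dict, and sorts the survivors by their rank.
import Mathlib
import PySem

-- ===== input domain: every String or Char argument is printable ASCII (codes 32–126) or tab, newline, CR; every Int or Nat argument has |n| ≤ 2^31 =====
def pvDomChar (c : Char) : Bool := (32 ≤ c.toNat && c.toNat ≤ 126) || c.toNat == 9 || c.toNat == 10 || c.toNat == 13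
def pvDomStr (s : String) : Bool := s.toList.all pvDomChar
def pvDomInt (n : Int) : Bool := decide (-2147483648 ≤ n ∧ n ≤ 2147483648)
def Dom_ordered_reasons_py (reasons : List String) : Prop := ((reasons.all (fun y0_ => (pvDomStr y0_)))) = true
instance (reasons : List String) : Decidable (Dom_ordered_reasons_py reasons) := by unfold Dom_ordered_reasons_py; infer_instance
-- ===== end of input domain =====

-- B re-implements the priority filter by iterating the input set and sorting survivors by a rank table (alternative decomposition, same cost).
-- The input set[str] is modelled as a List String of distinct elements; Pre_ states that distinctness.


-- ===== PORT A =====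
def ordered_reasons_py (reasons : List String) : List String :=
  let priority : List String :=
    ["stale_content", "affiliate_finance", "service_journalism",
     "low_trust_aggregator", "insufficient_high_quality_sources"]
  priority.filter (fun reason => decide (reason ∈ reasons))

-- ===== PORT B =====
-- rank = {r: i for i, r in enumerate([...])}
def pvRank : PySem.Dict String Int :=
  (PySem.List.enumerate
    ["stale_content", "affiliate_finance", "service_journalism",
     "low_trust_aggregator", "insufficient_high_quality_sources"] 0).foldl
    (fun d p => d.insert p.2 p.1) PySem.Dict.empty

def ordered_reasons_py_alt (reasons : List String) : List String :=
  let kept := reasons.filter (fun r => pvRank.contains r)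
  PySem.List.sorted kept (fun r => pvRank.getD r 0) false

-- ===== PRECONDITION & SPEC =====
-- Pre_ pins the set representation: the Python argument is a set, modelled as a list of DISTINCT strings.
def Pre_ordered_reasons_py (reasons : List String) : Prop := reasons.Nodup
instance (reasons : List String) : Decidable (Pre_ordered_reasons_py reasons) := by unfold Pre_ordered_reasons_py; infer_instance
def pvWitness_ordered_reasons_py : List String := ["x", "service_journalism", "stale_content"]

def Spec_ordered_reasons_py (reasons : List String) (out : List String) : Prop := out = ordered_reasons_py_alt reasons
instance (reasons : List String) (out : List String) : Decidable (Spec_ordered_reasons_py reasons out) := by unfold Spec_ordered_reasons_py; infer_instance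

-- ===== CLAIM (what is proved, stated in full; the proofs are below) =====
def Claim_equal_ordered_reasons_py : Prop := ∀ (reasons : List String), Dom_ordered_reasons_py reasons → Pre_ordered_reasons_py reasons → Spec_ordered_reasons_py reasons (ordered_reasons_py reasons)

-- ===== LEMMAS AND PROOFS =====

def pvPriority : List String :=
  ["stale_content", "affiliate_finance", "service_journalism",
   "low_trust_aggregator", "insufficient_high_quality_sources"]

theorem pvRank_contains (x : String) : pvRank.contains x = decide (x ∈ pvPriority) := by
  show (PySem.Dict.mk [("stale_content", (0:Int)), ("affiliate_finance", 1), ("service_journalism", 2),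
      ("low_trust_aggregator", 3), ("insufficient_high_quality_sources", 4)]).contains x = _
  simp [PySem.Dict.contains, pvPriority]
  rw [Bool.eq_iff_iff]
  simp
  tauto

theorem pvA_nodup (reasons : List String) : (ordered_reasons_py reasons).Nodup := by
  exact List.Nodup.filter _ (by decide)

theorem pvA_pairwise (reasons : List String) :
    (ordered_reasons_py reasons).Pairwise (fun a b => pvRank.getD a 0 < pvRank.getD b 0) := by
  unfold ordered_reasons_py
  simp only [List.filter]
  split <;> split <;> split <;> split <;> split <;> decide

theorem pvA_perm_kept (reasons : List String) (h : reasons.Nodup) :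
    (ordered_reasons_py reasons).Perm (reasons.filter (fun r => pvRank.contains r)) := by
  apply List.perm_of_nodup_nodup_toFinset_eq (pvA_nodup reasons) (List.Nodup.filter _ h)
  ext x
  simp [ordered_reasons_py, pvRank_contains, pvPriority]
  tauto

-- ===== VERDICT (by name: the statement is the Claim_ definition above) =====
theorem ordered_reasons_py_spec : Claim_equal_ordered_reasons_py := by
  intro reasons _ hpre
  unfold Spec_ordered_reasons_py ordered_reasons_py_alt
  exact (PySem.List.sorted_eq_of_perm_of_pairwise_lt _ _ _ (pvA_perm_kept reasons hpre) (pvA_pairwise reasons)).symm
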